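-- pv_equiv track=rewrite | github.com/IllyaMikava/DCP_Labs | Lab5.py | parse_all_tunes
-- ===== SOURCE A (Python) =====
-- def parse_tune(tune_lines):
--     """Parse a single tune from lines"""
--     tune = {
--         'X': None,
--         'title': None,
--         'alt_title': None,
--         'tune_type': None,
--         'key': None,
--         'notation': '\n'.join(tune_lines)
--     }
--
--     title_count = 0
--
--     for line in tune_lines:
--         line = line.strip()
--
--         # Parse X: (tune ID)
--         if line.startswith('X:'):
--             tune['X'] = line[2:].strip()
--
--         # Parse T: (title)
--         elif line.startswith('T:'):
--             title_count += 1
--             if title_count == 1: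
--                 tune['title'] = line[2:].strip()
--             elif title_count == 2:
--                 tune['alt_title'] = line[2:].strip()
--
--         # Parse R: (tune type)
--         elif line.startswith('R:'):
--             tune['tune_type'] = line[2:].strip()
--
--         # Parse K: (key)
--         elif line.startswith('K:'):
--             tune['key'] = line[2:].strip()
--
--     return tune
--
-- def parse_all_tunes(lines):
--     """Parse all tunes from lines"""
--     tunes = []
--     current_tune_lines = []
--     in_tune = False
--
--     for i, line in enumerate(lines):
--         # Check if this starts a new tune
--         if line.strip().startswith('X:'):
--             # If we were already collecting a tune, save it first
--             if current_tune_lines: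
--                 tunes.append(parse_tune(current_tune_lines))
--
--             # Start collecting new tune
--             current_tune_lines = [line]
--             in_tune = True
--
--         elif in_tune:
--             # Check if this is a blank line (end of tune)
--             if line.strip() == '' or line.strip() == '%%%':
--                 # Found end of tune
--                 tunes.append(parse_tune(current_tune_lines))
--                 current_tune_lines = []
--                 in_tune = False
--             else:
--                 # Still in tune, add line
--                 current_tune_lines.append(line)
--
--
--     if current_tune_lines:
--         tunes.append(parse_tune(current_tune_lines))
--
--     return tunes
-- ===== SOURCE B (Python) =====
-- def parse_tune(tune_lines):
--     """Field-extraction parse: strip once, pick each field directly."""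
--     stripped = [l.strip() for l in tune_lines]
--
--     def last_val(prefix):
--         for s in reversed(stripped):
--             if s.startswith(prefix):
--                 return s[2:].strip()
--         return None
--
--     titles = [s[2:].strip() for s in stripped if s.startswith('T:')]
--     return {
--         'X': last_val('X:'),
--         'title': titles[0] if titles else None,
--         'alt_title': titles[1] if len(titles) > 1 else None,
--         'tune_type': last_val('R:'),
--         'key': last_val('K:'),
--         'notation': '\n'.join(tune_lines),
--     }
--
--
-- def _is_boundary(line):
--     s = line.strip()
--     return s == '' or s == '%%%' or s.startswith('X:')
--
--
-- def parse_all_tunes(lines):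
--     """Boundary-first parse: find each 'X:' block, slice it out, extract fields."""
--     tunes = []
--     n = len(lines)
--     i = 0
--     while i < n:
--         if lines[i].strip().startswith('X:'):
--             j = i + 1
--             while j < n and not _is_boundary(lines[j]):
--                 j += 1
--             tunes.append(parse_tune(lines[i:j]))
--             i = j
--         else:
--             i += 1
--     return tunes
-- ===== Notes on version B (the rewrite author's own statement) =====
-- stated objective: alternative
-- what changed: Both loops are restructured: the driver's accumulate-and-flag state machine becomes a boundary-first block scan (find each 'X:' start, slice to the next terminator), and parse_tune's dict-updating state loop becomes direct per-field extraction (last match wins per field, list of T: titles).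
import Mathlib
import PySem

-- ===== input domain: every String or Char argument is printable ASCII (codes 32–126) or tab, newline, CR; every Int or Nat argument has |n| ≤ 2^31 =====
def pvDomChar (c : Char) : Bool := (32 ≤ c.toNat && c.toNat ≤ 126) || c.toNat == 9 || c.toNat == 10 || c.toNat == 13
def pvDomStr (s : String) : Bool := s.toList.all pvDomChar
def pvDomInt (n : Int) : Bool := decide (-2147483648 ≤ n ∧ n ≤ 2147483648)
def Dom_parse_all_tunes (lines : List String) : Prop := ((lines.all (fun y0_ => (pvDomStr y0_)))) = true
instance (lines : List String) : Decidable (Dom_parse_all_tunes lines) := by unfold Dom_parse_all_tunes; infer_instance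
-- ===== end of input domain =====

-- B replaces both loops of A: the driver's accumulate-and-flag state machine becomes a
-- boundary-first block scan (find each 'X:' start, slice to the next terminator), and
-- parse_tune's dict-updating state loop becomes direct field extraction (last match per
-- field, list of titles); an alternative decomposition of the same O(n) work.


-- ===== PORT A =====
-- A's parse_tune: a PySem.Dict String (Option String) threaded through the line loop,
-- returned as its assoc list (.items).
-- loop body of 'for line in tune_lines' (state: (tune, title_count))
def parseTuneStep (st : PySem.Dict String (Option String) × Int) (line : String) :
    PySem.Dict String (Option String) × Int :=
  let (tune, title_count) := st
  let line := PySem.Str.strip line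
  if PySem.Str.startswith line "X:" then
    (tune.insert "X" (some (PySem.Str.strip (PySem.Str.slice line (some 2) none))), title_count)
  else if PySem.Str.startswith line "T:" then
    let title_count := title_count + 1
    if title_count == 1 then
      (tune.insert "title" (some (PySem.Str.strip (PySem.Str.slice line (some 2) none))), title_count)
    else if title_count == 2 then
      (tune.insert "alt_title" (some (PySem.Str.strip (PySem.Str.slice line (some 2) none))), title_count)
    else (tune, title_count)
  else if PySem.Str.startswith line "R:" then
    (tune.insert "tune_type" (some (PySem.Str.strip (PySem.Str.slice line (some 2) none))), title_count)
  else if PySem.Str.startswith line "K:" then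
    (tune.insert "key" (some (PySem.Str.strip (PySem.Str.slice line (some 2) none))), title_count)
  else (tune, title_count)

def parse_tune (tune_lines : List String) : List (String × Option String) :=
  let tune : PySem.Dict String (Option String) :=
    PySem.Dict.ofList [("X", none), ("title", none), ("alt_title", none),
      ("tune_type", none), ("key", none), ("notation", some (PySem.Str.join "\n" tune_lines))]
  (tune_lines.foldl parseTuneStep (tune, 0)).1.items

-- loop body of A's 'for i, line in enumerate(lines)' (i is never used, so we fold
-- over the lines themselves); state: (tunes, current_tune_lines, in_tune)
def parseAllStep (st : List (List (String × Option String)) × List String × Bool)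
    (line : String) : List (List (String × Option String)) × List String × Bool :=
  let (tunes, current_tune_lines, in_tune) := st
  if PySem.Str.startswith (PySem.Str.strip line) "X:" then
    let tunes := if current_tune_lines ≠ [] then tunes ++ [parse_tune current_tune_lines] else tunes
    (tunes, [line], true)
  else if in_tune then
    if PySem.Str.strip line == "" || PySem.Str.strip line == "%%%" then
      (tunes ++ [parse_tune current_tune_lines], [], false)
    else
      (tunes, current_tune_lines ++ [line], in_tune)
  else (tunes, current_tune_lines, in_tune)

def parse_all_tunes (lines : List String) : List (List (String × Option String)) :=
  let st := lines.foldl parseAllStep ([], [], false)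
  if st.2.1 ≠ [] then st.1 ++ [parse_tune st.2.1] else st.1

-- ===== PORT B =====
-- Source B's last_val: walk the reversed stripped lines, return the first prefix match.
def lastVal (pre : String) (stripped : List String) : Option String :=
  match stripped.reverse.find? (fun s => PySem.Str.startswith s pre) with
  | some s => some (PySem.Str.strip (PySem.Str.slice s (some 2) none))
  | none => none

-- Source B's parse_tune: strip once, extract each field directly, build the record.
def parse_tune_alt (tune_lines : List String) : List (String × Option String) :=
  let stripped := tune_lines.map PySem.Str.strip
  let titles := (stripped.filter (fun s => PySem.Str.startswith s "T:")).map
      (fun s => PySem.Str.strip (PySem.Str.slice s (some 2) none))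
  [("X", lastVal "X:" stripped),
   ("title", titles[0]?),
   ("alt_title", titles[1]?),
   ("tune_type", lastVal "R:" stripped),
   ("key", lastVal "K:" stripped),
   ("notation", some (PySem.Str.join "\n" tune_lines))]

def pyIsBoundary (line : String) : Bool :=
  PySem.Str.strip line == "" || PySem.Str.strip line == "%%%"
    || PySem.Str.startswith (PySem.Str.strip line) "X:"

-- Source B's outer while-loop: at an 'X:' line take the block (inner while = takeWhile
-- not boundary), parse the slice and continue at the boundary (dropWhile).
def parse_all_tunes_alt : List String → List (List (String × Option String))
  | [] => []
  | l :: rest =>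
    if PySem.Str.startswith (PySem.Str.strip l) "X:" then
      parse_tune_alt (l :: rest.takeWhile (fun x => !pyIsBoundary x)) ::
        parse_all_tunes_alt (rest.dropWhile (fun x => !pyIsBoundary x))
    else
      parse_all_tunes_alt rest
termination_by ls => ls.length
decreasing_by
  · exact Nat.lt_succ_of_le (List.length_dropWhile_le _ _)
  · exact Nat.lt_succ_self _

-- ===== PRECONDITION & SPEC =====
def Spec_parse_all_tunes (lines : List String) (out : List (List (String × Option String))) : Prop := out = parse_all_tunes_alt lines
instance (lines : List String) (out : List (List (String × Option String))) : Decidable (Spec_parse_all_tunes lines out) := by unfold Spec_parse_all_tunes; infer_instance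

-- ===== CLAIM (what is proved, stated in full; the proofs are below) =====
def Claim_equal_parse_all_tunes : Prop := ∀ (lines : List String), Dom_parse_all_tunes lines → Spec_parse_all_tunes lines (parse_all_tunes lines)

-- ===== LEMMAS AND PROOFS =====

-- the tune dict of A, with the five field values abstracted
def mkTune (x t a r k : Option String) (n : String) : PySem.Dict String (Option String) :=
  PySem.Dict.ofList [("X", x), ("title", t), ("alt_title", a),
    ("tune_type", r), ("key", k), ("notation", some n)]

def fieldVal (s : String) : String := PySem.Str.strip (PySem.Str.slice s (some 2) none)

-- one step of the 'last match wins' fold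
def lastUpd (pre : String) (x : Option String) (s : String) : Option String :=
  if PySem.Str.startswith s pre then some (fieldVal s) else x

-- the title/alt_title/count evolution of A over the list of T:-values
def applyT : Int → Option String → Option String → List String → Option String × Option String × Int
  | c, t, a, [] => (t, a, c)
  | c, t, a, v :: vs =>
    applyT (c + 1) (if c + 1 == 1 then some v else t) (if c + 1 == 2 then some v else a) vs

def tvals (stripped : List String) : List String :=
  (stripped.filter (fun s => PySem.Str.startswith s "T:")).map fieldVal

-- two distinct 2-char prefixes cannot both begin the same string
theorem startswith2_disjoint {s : List Char} {a b : Char} (hne : a ≠ b)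
    (h : PySem.Chars.startswith s [a, ':'] = true) :
    PySem.Chars.startswith s [b, ':'] = false := by
  by_contra hb
  simp only [Bool.not_eq_false] at hb
  rw [PySem.Chars.startswith_iff] at h hb
  obtain ⟨u, hu⟩ := h
  obtain ⟨v, hv⟩ := hb
  rw [← hu] at hv
  simp at hv
  exact hne hv.1.symm

-- mkTune insertions hit their own slot
theorem mkTune_insert_X (x t a r k v : Option String) (n : String) :
    (mkTune x t a r k n).insert "X" v = mkTune v t a r k n := by
  simp [mkTune, PySem.Dict.ofList, PySem.Dict.insert, PySem.Dict.update,
    PySem.Dict.empty, PySem.Dict.contains]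
theorem mkTune_insert_title (x t a r k v : Option String) (n : String) :
    (mkTune x t a r k n).insert "title" v = mkTune x v a r k n := by
  simp [mkTune, PySem.Dict.ofList, PySem.Dict.insert, PySem.Dict.update,
    PySem.Dict.empty, PySem.Dict.contains]
theorem mkTune_insert_alt (x t a r k v : Option String) (n : String) :
    (mkTune x t a r k n).insert "alt_title" v = mkTune x t v r k n := by
  simp [mkTune, PySem.Dict.ofList, PySem.Dict.insert, PySem.Dict.update,
    PySem.Dict.empty, PySem.Dict.contains]
theorem mkTune_insert_type (x t a r k v : Option String) (n : String) :
    (mkTune x t a r k n).insert "tune_type" v = mkTune x t a v k n := by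
  simp [mkTune, PySem.Dict.ofList, PySem.Dict.insert, PySem.Dict.update,
    PySem.Dict.empty, PySem.Dict.contains]
theorem mkTune_insert_key (x t a r k v : Option String) (n : String) :
    (mkTune x t a r k n).insert "key" v = mkTune x t a r v n := by
  simp [mkTune, PySem.Dict.ofList, PySem.Dict.insert, PySem.Dict.update,
    PySem.Dict.empty, PySem.Dict.contains]
theorem mkTune_items (x t a r k : Option String) (n : String) :
    (mkTune x t a r k n).items = [("X", x), ("title", t), ("alt_title", a),
      ("tune_type", r), ("key", k), ("notation", some n)] := by
  simp [mkTune, PySem.Dict.ofList, PySem.Dict.insert, PySem.Dict.update,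
    PySem.Dict.empty, PySem.Dict.contains]

-- the reversed-find of Source B equals A's left-to-right 'last match wins' fold
theorem lastVal_eq_foldl (pre : String) : ∀ (S : List String) (x : Option String),
    (match S.reverse.find? (fun s => PySem.Str.startswith s pre) with
      | some s => some (fieldVal s)
      | none => x) = S.foldl (lastUpd pre) x := by
  intro S
  induction S with
  | nil => intro x; simp
  | cons s S ih =>
    intro x
    simp only [List.reverse_cons, List.find?_append, List.foldl_cons]
    rw [← ih (lastUpd pre x s)]
    cases hf : S.reverse.find? (fun s => PySem.Str.startswith s pre) with
    | some u => simp
    | none =>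
      simp only [Option.none_or]
      unfold lastUpd
      by_cases hp : PySem.Chars.startswith s.toList pre.toList = true <;>
        simp [PySem.Str.startswith_eq, hp]

-- applyT freezes title/alt_title once the count has reached 2
theorem applyT_frozen : ∀ (vs : List String) (c : Int) (t a : Option String), 2 ≤ c →
    (applyT c t a vs).1 = t ∧ (applyT c t a vs).2.1 = a := by
  intro vs
  induction vs with
  | nil => intro c t a _; simp [applyT]
  | cons v vs ih =>
    intro c t a hc
    unfold applyT
    have h1 : (c + 1 == (1 : Int)) = false := by simp; omega
    have h2 : (c + 1 == (2 : Int)) = false := by simp; omega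
    rw [h1, h2]
    exact ih (c + 1) t a (by omega)

-- from count 0, applyT picks the first and second T: values
theorem applyT_zero (vs : List String) :
    (applyT 0 none none vs).1 = vs[0]? ∧ (applyT 0 none none vs).2.1 = vs[1]? := by
  match vs with
  | [] => simp [applyT]
  | [v] => simp [applyT]
  | v :: w :: vs =>
    unfold applyT
    norm_num
    unfold applyT
    norm_num
    have := applyT_frozen vs 2 (some v) (some w) (by omega)
    simp [this.1, this.2]

-- the main parse_tune invariant: A's fold over the lines, from an abstracted dict state
theorem parse_tune_inv : ∀ (ls : List String) (x t a r k : Option String) (n : String) (c : Int),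
    ls.foldl parseTuneStep (mkTune x t a r k n, c) =
      (mkTune ((ls.map PySem.Str.strip).foldl (lastUpd "X:") x)
        (applyT c t a (tvals (ls.map PySem.Str.strip))).1
        (applyT c t a (tvals (ls.map PySem.Str.strip))).2.1
        ((ls.map PySem.Str.strip).foldl (lastUpd "R:") r)
        ((ls.map PySem.Str.strip).foldl (lastUpd "K:") k)
        n,
      (applyT c t a (tvals (ls.map PySem.Str.strip))).2.2) := by
  intro ls
  induction ls with
  | nil => intro x t a r k n c; simp [tvals, applyT]
  | cons l ls ih =>
    intro x t a r k n c
    rw [List.foldl_cons]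
    by_cases hx : PySem.Chars.startswith (PySem.Chars.strip l.toList) ['X', ':'] = true
    · have hT := startswith2_disjoint (show 'X' ≠ 'T' by decide) hx
      have hR := startswith2_disjoint (show 'X' ≠ 'R' by decide) hx
      have hK := startswith2_disjoint (show 'X' ≠ 'K' by decide) hx
      simp [parseTuneStep, hx, hT, hR, hK, mkTune_insert_X, ih, tvals, lastUpd, fieldVal]
    · by_cases ht : PySem.Chars.startswith (PySem.Chars.strip l.toList) ['T', ':'] = true
      · have hR := startswith2_disjoint (show 'T' ≠ 'R' by decide) ht
        have hK := startswith2_disjoint (show 'T' ≠ 'K' by decide) ht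
        by_cases h1 : (c + 1 == (1 : Int)) = true
        · have h2 : (c + 1 == (2 : Int)) = false := by simp at h1 ⊢; omega
          simp [parseTuneStep, hx, ht, hR, hK, h1, h2, mkTune_insert_title, ih, tvals,
            lastUpd, fieldVal, applyT]
        · by_cases h2 : (c + 1 == (2 : Int)) = true
          · simp [parseTuneStep, hx, ht, hR, hK, h1, h2, mkTune_insert_alt, ih, tvals,
              lastUpd, fieldVal, applyT]
          · simp [parseTuneStep, hx, ht, hR, hK, h1, h2, ih, tvals, lastUpd, fieldVal, applyT]
      · by_cases hr : PySem.Chars.startswith (PySem.Chars.strip l.toList) ['R', ':'] = true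
        · have hK := startswith2_disjoint (show 'R' ≠ 'K' by decide) hr
          simp [parseTuneStep, hx, ht, hr, hK, mkTune_insert_type, ih, tvals, lastUpd,
            fieldVal]
        · by_cases hk : PySem.Chars.startswith (PySem.Chars.strip l.toList) ['K', ':'] = true
          · simp [parseTuneStep, hx, ht, hr, hk, mkTune_insert_key, ih, tvals, lastUpd,
              fieldVal]
          · simp [parseTuneStep, hx, ht, hr, hk, ih, tvals, lastUpd]

-- the two parse_tune implementations agree
theorem parse_tune_eq (ls : List String) : parse_tune ls = parse_tune_alt ls := by
  unfold parse_tune parse_tune_alt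
  have h0 : (PySem.Dict.ofList [("X", (none : Option String)), ("title", none), ("alt_title", none),
      ("tune_type", none), ("key", none), ("notation", some (PySem.Str.join "\n" ls))]) =
      mkTune none none none none none (PySem.Str.join "\n" ls) := rfl
  dsimp only
  rw [h0, parse_tune_inv, mkTune_items]
  have hx := lastVal_eq_foldl "X:" (ls.map PySem.Str.strip) none
  have hr := lastVal_eq_foldl "R:" (ls.map PySem.Str.strip) none
  have hk := lastVal_eq_foldl "K:" (ls.map PySem.Str.strip) none
  have hT := applyT_zero (tvals (ls.map PySem.Str.strip))
  simp only [lastVal, fieldVal] at hx hr hk ⊢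
  rw [← hx, ← hr, ← hk]
  simp [tvals, List.getElem?_map] at hT
  simp [tvals, hT.1, hT.2, List.getElem?_map]
  unfold fieldVal
  exact ⟨rfl, rfl⟩

-- A's final flush ('if current_tune_lines: tunes.append(...)')
def flushA (st : List (List (String × Option String)) × List String × Bool) :
    List (List (String × Option String)) :=
  if st.2.1 ≠ [] then st.1 ++ [parse_tune st.2.1] else st.1

-- the driver invariant: running A's loop from either reachable state shape and then
-- flushing equals the accumulated tunes followed by B's block decomposition.
theorem parseAll_invariant (rest : List String) :
    (∀ tunes, flushA (rest.foldl parseAllStep (tunes, [], false)) =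
        tunes ++ parse_all_tunes_alt rest) ∧
    (∀ tunes cur, cur ≠ [] →
      flushA (rest.foldl parseAllStep (tunes, cur, true)) =
        tunes ++ parse_tune (cur ++ rest.takeWhile (fun x => !pyIsBoundary x)) ::
          parse_all_tunes_alt (rest.dropWhile (fun x => !pyIsBoundary x))) := by
  induction rest with
  | nil =>
    refine ⟨fun tunes => ?_, fun tunes cur hcur => ?_⟩
    · simp [flushA, parse_all_tunes_alt]
    · simp [flushA, hcur, parse_all_tunes_alt]
  | cons l rest ih =>
    obtain ⟨ih1, ih2⟩ := ih
    by_cases hx : PySem.Chars.startswith (PySem.Chars.strip l.toList) ['X', ':'] = true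
    · have hb : pyIsBoundary l = true := by simp [pyIsBoundary]; simp at hx; tauto
      have halt : parse_all_tunes_alt (l :: rest) =
          parse_tune (l :: rest.takeWhile (fun x => !pyIsBoundary x)) ::
            parse_all_tunes_alt (rest.dropWhile (fun x => !pyIsBoundary x)) := by
        rw [parse_all_tunes_alt, ← parse_tune_eq]; simp [hx]
      refine ⟨fun tunes => ?_, fun tunes cur hcur => ?_⟩
      · have hstep : List.foldl parseAllStep (tunes, [], false) (l :: rest) =
            List.foldl parseAllStep (tunes, [l], true) rest := by
          rw [List.foldl_cons]; simp [parseAllStep, hx]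
        rw [hstep, ih2 tunes [l] (by simp), halt]
        simp
      · have hstep : List.foldl parseAllStep (tunes, cur, true) (l :: rest) =
            List.foldl parseAllStep (tunes ++ [parse_tune cur], [l], true) rest := by
          rw [List.foldl_cons]; simp [parseAllStep, hx, hcur]
        rw [hstep, ih2 _ [l] (by simp)]
        simp [hb, halt]
    · by_cases ht : PySem.Str.strip l = "" ∨ PySem.Str.strip l = "%%%"
      · have hb : pyIsBoundary l = true := by simp [pyIsBoundary]; simp at ht; tauto
        have halt : parse_all_tunes_alt (l :: rest) = parse_all_tunes_alt rest := by
          rw [parse_all_tunes_alt]; simp [hx]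
        refine ⟨fun tunes => ?_, fun tunes cur hcur => ?_⟩
        · have hstep : List.foldl parseAllStep (tunes, [], false) (l :: rest) =
              List.foldl parseAllStep (tunes, [], false) rest := by
            rw [List.foldl_cons]; simp [parseAllStep, hx]
          rw [hstep, ih1 tunes, halt]
        · have hstep : List.foldl parseAllStep (tunes, cur, true) (l :: rest) =
              List.foldl parseAllStep (tunes ++ [parse_tune cur], [], false) rest := by
            rw [List.foldl_cons]; simp [parseAllStep, hx, ht]
          rw [hstep, ih1]
          simp [hb, halt]
      · have hb : pyIsBoundary l = false := by
          simp [pyIsBoundary]; simp at hx ht; tauto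
        refine ⟨fun tunes => ?_, fun tunes cur hcur => ?_⟩
        · have hstep : List.foldl parseAllStep (tunes, [], false) (l :: rest) =
              List.foldl parseAllStep (tunes, [], false) rest := by
            rw [List.foldl_cons]; simp [parseAllStep, hx]
          have halt : parse_all_tunes_alt (l :: rest) = parse_all_tunes_alt rest := by
            rw [parse_all_tunes_alt]; simp [hx]
          rw [hstep, ih1 tunes, halt]
        · have hstep : List.foldl parseAllStep (tunes, cur, true) (l :: rest) =
              List.foldl parseAllStep (tunes, cur ++ [l], true) rest := by
            rw [List.foldl_cons]; simp [parseAllStep, hx, ht]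
          rw [hstep, ih2 tunes (cur ++ [l]) (by simp)]
          simp [hb, List.append_assoc]

-- ===== VERDICT (by name: the statement is the Claim_ definition above) =====
theorem parse_all_tunes_spec : Claim_equal_parse_all_tunes := by
  intro lines _
  show parse_all_tunes lines = parse_all_tunes_alt lines
  have h := (parseAll_invariant lines).1 []
  simpa [parse_all_tunes, flushA] using h
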